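-- pv_equiv track=rewrite | github.com/crowjdh/QuesStudyCabinet | 180525/codefight/arcade/intro/JungDongHyun/52. longestWord.py | find_word_range_from
-- ===== SOURCE A (Python) =====
-- def find_word_range_from(text, from_idx):
--     is_uppercase_alphabet = lambda elem: ord(elem) in range(ord('A'), ord('Z') + 1)
--     is_lowercase_alphabet = lambda elem: ord(elem) in range(ord('a'), ord('z') + 1)
--     is_alphabet = lambda elem: is_uppercase_alphabet(elem) or is_lowercase_alphabet(elem)
--
--     start_idx = -1
--     end_idx = -1
--
--     has_not_started = lambda: start_idx < 0
--     has_not_ended = lambda: end_idx < 0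
--
--     for i in range(from_idx, len(text)):
--         char = text[i]
--
--         if has_not_started():
--             start_idx = i if is_alphabet(char) else -1
--         elif has_not_ended():
--             if not is_alphabet(char):
--                 end_idx = i
--                 break
--
--     return start_idx, end_idx
-- ===== SOURCE B (Python) =====
-- def find_word_range_from(text, from_idx):
--     # Stage 1: tokenise the whole text into its maximal alphabetic runs [s, e).
--     runs = []
--     start = None
--     for i, ch in enumerate(text):
--         if ch.isalpha():
--             if start is None:
--                 start = i
--         elif start is not None:
--             runs.append((start, i))
--             start = None
--     if start is not None:
--         runs.append((start, len(text)))
--     # Stage 2: the answer comes from the first run ending after the scan position.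
--     pos = max(from_idx, 0)
--     for s, e in runs:
--         if pos < e:
--             return max(s, pos), -1 if e == len(text) else e
--     return -1, -1
-- ===== Notes on version B (the rewrite author's own statement) =====
-- stated objective: alternative
-- what changed: Replaces A's single stateful scan from the index (start/end flags, per-char lambdas, break) by a two-stage pipeline: tokenise the whole text into its maximal alphabetic runs, then select the first run ending after the clamped position.
import Mathlib
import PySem

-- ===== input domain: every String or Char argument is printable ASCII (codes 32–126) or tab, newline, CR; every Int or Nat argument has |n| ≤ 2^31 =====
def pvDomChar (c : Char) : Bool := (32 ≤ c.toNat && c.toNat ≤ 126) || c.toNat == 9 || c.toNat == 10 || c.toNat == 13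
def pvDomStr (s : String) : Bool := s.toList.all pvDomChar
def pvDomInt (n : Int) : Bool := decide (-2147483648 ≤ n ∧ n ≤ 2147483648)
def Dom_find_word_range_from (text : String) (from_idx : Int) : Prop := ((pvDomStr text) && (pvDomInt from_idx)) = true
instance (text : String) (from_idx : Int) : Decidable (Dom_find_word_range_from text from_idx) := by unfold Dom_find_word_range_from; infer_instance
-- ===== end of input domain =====

-- B replaces A's single stateful scan from the index by a two-stage pipeline
-- (tokenise the whole text into its maximal alphabetic runs, then select the first
-- run ending after the clamped position); a genuinely different traversal, intended
-- to also save A's per-character lambda calls. B's `.isalpha` is exact on the ASCII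
-- domain stated above.

-- ===== PORT A =====
-- ord(elem) in range(ord('A'), ord('Z')+1) or ord(elem) in range(ord('a'), ord('z')+1)
def pvIsAlphabet (c : Char) : Bool :=
  (65 ≤ c.toNat && c.toNat ≤ 90) || (97 ≤ c.toNat && c.toNat ≤ 122)

-- the for-loop with its two-phase state (start_idx, end_idx) and the break
def pvGoA (chars : List Char) : List Int → Int → Int → Int × Int
  | [], s, e => (s, e)
  | i :: rest, s, e =>
    match PySem.List.pyGet? chars i with
    | none => (s, e)   -- text[i] raises IndexError in Python; excluded by Pre_
    | some c =>
      if s < 0 then pvGoA chars rest (if pvIsAlphabet c then i else -1) e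
      else if e < 0 then
        if !(pvIsAlphabet c) then (s, i)   -- end_idx = i; break
        else pvGoA chars rest s e
      else pvGoA chars rest s e

def find_word_range_from (text : String) (from_idx : Int) : Int × Int :=
  pvGoA text.toList (PySem.List.pyRange from_idx (text.toList.length : Int) 1) (-1) (-1)

-- ===== PORT B =====
-- body of Source B's tokenising loop: state = (runs, start), one enumerated char at a time
def pvRunsStep (st : List (Int × Int) × Option Int) (ic : Int × Char) : List (Int × Int) × Option Int :=
  if PySem.Chars.isalpha ic.2 then
    match st.2 with
    | none => (st.1, some ic.1)
    | some _ => st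
  else
    match st.2 with
    | some s0 => (st.1 ++ [(s0, ic.1)], none)
    | none => st

-- Source B's selection loop: the first run ending after pos (n = len(text))
def pvSelect : List (Int × Int) → Int → Int → Int × Int
  | [], _, _ => (-1, -1)
  | (s, e) :: rest, pos, n =>
    if pos < e then (max s pos, if e == n then -1 else e)
    else pvSelect rest pos n

def find_word_range_from_alt (text : String) (from_idx : Int) : Int × Int :=
  let chars := text.toList
  -- Stage 1: tokenise the whole text into its maximal alphabetic runs
  let st := (PySem.List.enumerate chars 0).foldl pvRunsStep ([], none)
  let runs := match st.2 with
    | some s0 => st.1 ++ [(s0, (chars.length : Int))]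
    | none => st.1
  -- Stage 2: the answer comes from the first run ending after the scan position
  pvSelect runs (max from_idx 0) (chars.length : Int)

-- ===== PRECONDITION & SPEC =====
-- A raises IndexError iff from_idx < -len(text) (the first wrapped index is out of range);
-- Pre_ admits every input on which A returns, including negative from_idx down to -len(text).
def Pre_find_word_range_from (text : String) (from_idx : Int) : Prop :=
  -(text.toList.length : Int) ≤ from_idx
instance (text : String) (from_idx : Int) : Decidable (Pre_find_word_range_from text from_idx) := by
  unfold Pre_find_word_range_from; infer_instance

def pvWitness_find_word_range_from : String × Int := ("a word.", -3)

def Spec_find_word_range_from (text : String) (from_idx : Int) (out : Int × Int) : Prop := out = find_word_range_from_alt text from_idx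
instance (text : String) (from_idx : Int) (out : Int × Int) : Decidable (Spec_find_word_range_from text from_idx out) := by unfold Spec_find_word_range_from; infer_instance

-- ===== CLAIM (what is proved, stated in full; the proofs are below) =====
def Claim_equal_find_word_range_from : Prop := ∀ (text : String) (from_idx : Int), Dom_find_word_range_from text from_idx → Pre_find_word_range_from text from_idx → Spec_find_word_range_from text from_idx (find_word_range_from text from_idx)

-- ===== LEMMAS AND PROOFS =====

-- shared middle form: first alphabetic index ≥ k, then first non-alphabetic index after it
def pvFindFrom (chars : List Char) (p : Char → Bool) (pos : Nat) : Int :=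
  match (chars.drop pos).findIdx? p with
  | none => -1
  | some j => ((pos + j : Nat) : Int)

def pvTwo (chars : List Char) (k : Nat) : Int × Int :=
  let start := pvFindFrom chars PySem.Chars.isalpha k
  if start == -1 then (-1, -1)
  else (start, pvFindFrom chars (fun c => !(PySem.Chars.isalpha c)) (start.toNat + 1))

-- A's ord-range test coincides with PySem's ASCII isalpha
theorem pvIsAlphabet_eq (c : Char) : pvIsAlphabet c = PySem.Chars.isalpha c := by
  simp only [pvIsAlphabet, PySem.Chars.isalpha, PySem.Chars.isupper, PySem.Chars.islower,
    Char.le_def, UInt32.le_iff_toNat_le, Char.toNat]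
  exact Bool.le_antisymm (fun a => a) fun a => a

-- one step of the middle form's search: a non-matching character is skipped
theorem pvFindFrom_cons_false (chars : List Char) (p : Char → Bool) (k : Nat)
    (hlt : k < chars.length) (hp : p chars[k] = false) :
    pvFindFrom chars p k = pvFindFrom chars p (k + 1) := by
  unfold pvFindFrom
  rw [List.drop_eq_getElem_cons hlt, List.findIdx?_cons, hp]
  simp only [Bool.false_eq_true, if_false]
  cases hfi : (chars.drop (k + 1)).findIdx? p with
  | none => simp
  | some j => simp only [Option.map_some]; congr 1; omega

-- one step of the middle form's search: a matching character is the answer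
theorem pvFindFrom_cons_true (chars : List Char) (p : Char → Bool) (k : Nat)
    (hlt : k < chars.length) (hp : p chars[k] = true) :
    pvFindFrom chars p k = (k : Int) := by
  unfold pvFindFrom
  rw [List.drop_eq_getElem_cons hlt, List.findIdx?_cons, hp]
  simp

-- ===== A-side: A's loop from a non-negative index equals the middle form =====

-- started phase: start_idx = s ≥ 0, end_idx = -1; the loop returns (s, first non-alpha ≥ k)
theorem pvGoA_started (chars : List Char) (m : Nat) :
    ∀ (k : Nat) (s : Int), 0 ≤ s → chars.length ≤ k + m →
      pvGoA chars (PySem.List.pyRange (k : Int) (chars.length : Int) 1) s (-1)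
        = (s, pvFindFrom chars (fun c => !(PySem.Chars.isalpha c)) k) := by
  induction m with
  | zero =>
    intro k s hs hk
    rw [PySem.List.pyRange_one_eq_nil (by exact_mod_cast hk)]
    have hd : chars.drop k = [] := List.drop_eq_nil_of_le (by omega)
    simp [pvGoA, pvFindFrom, hd]
  | succ m ih =>
    intro k s hs hk
    by_cases hlt : k < chars.length
    · rw [PySem.List.pyRange_one_cons (by exact_mod_cast hlt)]
      have hget : PySem.List.pyGet? chars (k : Int) = some chars[k] :=
        PySem.List.pyGet?_ofNat chars k hlt
      simp only [pvGoA, hget]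
      rw [if_neg (by omega), if_pos (by omega)]
      have hcast : ((k : Int)) + 1 = ((k + 1 : Nat) : Int) := by push_cast; ring
      by_cases ha : PySem.Chars.isalpha chars[k]
      · -- alphabetic: not the first non-alpha, the loop continues
        rw [if_neg (by simp [pvIsAlphabet_eq, ha])]
        rw [hcast, ih (k + 1) s hs (by omega),
          pvFindFrom_cons_false chars _ k hlt (by simp [ha])]
      · -- non-alphabetic: end_idx = k, break
        rw [if_pos (by simp [pvIsAlphabet_eq, ha]),
          pvFindFrom_cons_true chars _ k hlt (by simp [ha])]
    · rw [PySem.List.pyRange_one_eq_nil (by exact_mod_cast (by omega : chars.length ≤ k))]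
      have hd : chars.drop k = [] := List.drop_eq_nil_of_le (by omega)
      simp [pvGoA, pvFindFrom, hd]

-- not-started phase (start_idx = -1): the loop from k computes the two searches from k
theorem pvGoA_scan (chars : List Char) (m : Nat) :
    ∀ (k : Nat), chars.length ≤ k + m →
      pvGoA chars (PySem.List.pyRange (k : Int) (chars.length : Int) 1) (-1) (-1)
        = (match (chars.drop k).findIdx? PySem.Chars.isalpha with
           | none => (-1, -1)
           | some j => (((k + j : Nat) : Int),
               pvFindFrom chars (fun c => !(PySem.Chars.isalpha c)) (k + j + 1))) := by
  induction m with
  | zero =>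
    intro k hk
    rw [PySem.List.pyRange_one_eq_nil (by exact_mod_cast hk)]
    have hd : chars.drop k = [] := List.drop_eq_nil_of_le (by omega)
    simp [pvGoA, hd]
  | succ m ih =>
    intro k hk
    by_cases hlt : k < chars.length
    · rw [PySem.List.pyRange_one_cons (by exact_mod_cast hlt)]
      have hget : PySem.List.pyGet? chars (k : Int) = some chars[k] :=
        PySem.List.pyGet?_ofNat chars k hlt
      have hdrop : chars.drop k = chars[k] :: chars.drop (k + 1) :=
        List.drop_eq_getElem_cons hlt
      simp only [pvGoA, hget]
      rw [if_pos (by omega)]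
      have hcast : ((k : Int)) + 1 = ((k + 1 : Nat) : Int) := by push_cast; ring
      rw [hdrop, List.findIdx?_cons]
      by_cases ha : PySem.Chars.isalpha chars[k]
      · -- first alphabetic char found at k: switch to the started phase with s = k
        rw [if_pos (by simp [pvIsAlphabet_eq, ha])]
        rw [hcast, pvGoA_started chars m (k + 1) (k : Int) (by omega) (by omega)]
        simp [ha]
      · rw [if_neg (by simp [pvIsAlphabet_eq, ha])]
        rw [hcast, ih (k + 1) (by omega)]
        simp only [show (PySem.Chars.isalpha chars[k] = true) = False by
          simp [ha], if_false]
        cases hfi : (chars.drop (k + 1)).findIdx? PySem.Chars.isalpha with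
        | none => simp
        | some j =>
          simp only [Option.map_some]
          have he : k + 1 + j = k + (j + 1) := by omega
          rw [he]
    · rw [PySem.List.pyRange_one_eq_nil (by exact_mod_cast (by omega : chars.length ≤ k))]
      have hd : chars.drop k = [] := List.drop_eq_nil_of_le (by omega)
      simp [pvGoA, hd]

-- any start_idx < 0 behaves like -1 at the next step (it is overwritten before being read)
theorem pvGoA_neg_start (chars : List Char) (k : Nat) (hlt : k < chars.length)
    (s : Int) (hs : s < 0) :
    pvGoA chars (PySem.List.pyRange (k : Int) (chars.length : Int) 1) s (-1)
      = pvGoA chars (PySem.List.pyRange (k : Int) (chars.length : Int) 1) (-1) (-1) := by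
  rw [PySem.List.pyRange_one_cons (by exact_mod_cast hlt)]
  have hget : PySem.List.pyGet? chars (k : Int) = some chars[k] :=
    PySem.List.pyGet?_ofNat chars k hlt
  simp only [pvGoA, hget]
  rw [if_pos hs]
  norm_num

-- negative prefix: indices -m .. -1 only reassign start_idx to another negative value
theorem pvGoA_neg_prefix (chars : List Char) (m : Nat) :
    ∀ (s : Int), s < 0 → 0 < m → m ≤ chars.length →
      pvGoA chars (PySem.List.pyRange (-(m : Int)) (chars.length : Int) 1) s (-1)
        = pvGoA chars (PySem.List.pyRange 0 (chars.length : Int) 1) (-1) (-1) := by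
  induction m with
  | zero => intro s _ h0 _; omega
  | succ m ih =>
    intro s hs _ hm
    rw [PySem.List.pyRange_one_cons (by push_cast; omega)]
    have hget : PySem.List.pyGet? chars (-((m + 1 : Nat) : Int))
        = some chars[chars.length - (m + 1)] := by
      have := PySem.List.pyGet?_neg_natCast (xs := chars) (k := m + 1) (by omega) (by omega)
      rw [this, List.getElem?_eq_getElem (by omega)]
    simp only [pvGoA, hget]
    rw [if_pos hs]
    have hnext : -((m + 1 : Nat) : Int) + 1 = -((m : Nat) : Int) := by push_cast; ring
    rw [hnext]
    by_cases hm0 : m = 0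
    · subst hm0
      have h0 : -((0 : Nat) : Int) = ((0 : Nat) : Int) := by norm_num
      rw [h0]
      by_cases ha : pvIsAlphabet chars[chars.length - (0 + 1)]
      · rw [if_pos ha]
        exact pvGoA_neg_start chars 0 (by omega) _ (by norm_num)
      · rw [if_neg ha]
        exact pvGoA_neg_start chars 0 (by omega) _ (by omega)
    · by_cases ha : pvIsAlphabet chars[chars.length - (m + 1)]
      · rw [if_pos ha]; exact ih _ (by push_cast; omega) (by omega) (by omega)
      · rw [if_neg ha]; exact ih _ (by omega) (by omega) (by omega)

-- A's loop from a non-negative k equals the middle form started at k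
theorem pvKey (chars : List Char) (k : Nat) :
    pvGoA chars (PySem.List.pyRange (k : Int) (chars.length : Int) 1) (-1) (-1)
      = pvTwo chars k := by
  rw [pvGoA_scan chars chars.length k (by omega)]
  show _ = (if pvFindFrom chars PySem.Chars.isalpha k == -1 then ((-1 : Int), (-1 : Int))
    else (pvFindFrom chars PySem.Chars.isalpha k,
      pvFindFrom chars (fun c => !(PySem.Chars.isalpha c))
        ((pvFindFrom chars PySem.Chars.isalpha k).toNat + 1)))
  unfold pvFindFrom
  cases hfi : (chars.drop k).findIdx? PySem.Chars.isalpha with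
  | none => simp
  | some j =>
    have hne : (((k + j : Nat) : Int) == -1) = false := by
      simp only [beq_eq_false_iff_ne, ne_eq]
      omega
    simp only [hne, Bool.false_eq_true, if_false, Int.toNat_natCast]

-- ===== B-side: the tokenise-then-select pipeline equals the middle form =====

def pvCastOpt : Option Nat → Option Int
  | none => none
  | some x => some (x : Int)

-- structural version of the tokenising fold (proof helper; Nat indices)
def pvGo : List Char → Nat → Option Nat → List (Int × Int)
  | [], _, none => []
  | [], base, some s0 => [((s0 : Int), (base : Int))]
  | c :: rest, base, s =>
    if PySem.Chars.isalpha c then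
      match s with
      | none => pvGo rest (base + 1) (some base)
      | some s0 => pvGo rest (base + 1) (some s0)
    else
      match s with
      | some s0 => ((s0 : Int), (base : Int)) :: pvGo rest (base + 1) none
      | none => pvGo rest (base + 1) none

-- the fold over enumerate, finalised, is pvGo
theorem pvFold_eq_go (l : List Char) :
    ∀ (base : Nat) (runs0 : List (Int × Int)) (s : Option Nat),
      (match ((PySem.List.enumerate l (base : Int)).foldl pvRunsStep (runs0, pvCastOpt s)).2 with
       | some s0 => ((PySem.List.enumerate l (base : Int)).foldl pvRunsStep (runs0, pvCastOpt s)).1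
           ++ [(s0, ((base + l.length : Nat) : Int))]
       | none => ((PySem.List.enumerate l (base : Int)).foldl pvRunsStep (runs0, pvCastOpt s)).1)
      = runs0 ++ pvGo l base s := by
  induction l with
  | nil =>
    intro base runs0 s
    cases s <;> simp [PySem.List.enumerate_nil, pvGo, pvCastOpt]
  | cons c rest ih =>
    intro base runs0 s
    rw [PySem.List.enumerate_cons, List.foldl_cons]
    have hcast : ((base : Int)) + 1 = ((base + 1 : Nat) : Int) := by push_cast; ring
    have hlen : base + 1 + rest.length = base + (c :: rest).length := by
      simp only [List.length_cons]; omega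
    by_cases ha : PySem.Chars.isalpha c
    · cases s with
      | none =>
        rw [show pvRunsStep (runs0, pvCastOpt none) ((base : Int), c)
            = (runs0, pvCastOpt (some base)) from by simp [pvRunsStep, pvCastOpt, ha]]
        rw [hcast, ← hlen, ih (base + 1) runs0 (some base)]
        rw [show pvGo (c :: rest) base none = pvGo rest (base + 1) (some base) from by
          simp [pvGo, ha]]
      | some s0 =>
        rw [show pvRunsStep (runs0, pvCastOpt (some s0)) ((base : Int), c)
            = (runs0, pvCastOpt (some s0)) from by simp [pvRunsStep, pvCastOpt, ha]]
        rw [hcast, ← hlen, ih (base + 1) runs0 (some s0)]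
        rw [show pvGo (c :: rest) base (some s0) = pvGo rest (base + 1) (some s0) from by
          simp [pvGo, ha]]
    · cases s with
      | none =>
        rw [show pvRunsStep (runs0, pvCastOpt none) ((base : Int), c)
            = (runs0, pvCastOpt none) from by simp [pvRunsStep, pvCastOpt, ha]]
        rw [hcast, ← hlen, ih (base + 1) runs0 none]
        rw [show pvGo (c :: rest) base none = pvGo rest (base + 1) none from by
          simp [pvGo, ha]]
      | some s0 =>
        rw [show pvRunsStep (runs0, pvCastOpt (some s0)) ((base : Int), c)
            = (runs0 ++ [((s0 : Int), (base : Int))], pvCastOpt none) from by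
          simp [pvRunsStep, pvCastOpt, ha]]
        rw [hcast, ← hlen, ih (base + 1) (runs0 ++ [((s0 : Int), (base : Int))]) none]
        rw [show pvGo (c :: rest) base (some s0)
            = ((s0 : Int), (base : Int)) :: pvGo rest (base + 1) none from by
          simp [pvGo, ha]]
        simp [List.append_assoc]

-- inside a run: pvGo with an open run emits it closed at the end of the alphabetic prefix
theorem pvGo_some (l : List Char) :
    ∀ (base s0 : Nat),
      pvGo l base (some s0)
        = (if (l.takeWhile PySem.Chars.isalpha).length < l.length then
             ((s0 : Int), ((base + (l.takeWhile PySem.Chars.isalpha).length : Nat) : Int))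
               :: pvGo (l.drop ((l.takeWhile PySem.Chars.isalpha).length + 1))
                    (base + (l.takeWhile PySem.Chars.isalpha).length + 1) none
           else [((s0 : Int), ((base + l.length : Nat) : Int))]) := by
  induction l with
  | nil => intro base s0; simp [pvGo]
  | cons c rest ih =>
    intro base s0
    by_cases ha : PySem.Chars.isalpha c
    · have htw : (c :: rest).takeWhile PySem.Chars.isalpha
          = c :: rest.takeWhile PySem.Chars.isalpha := by
        simp [ha]
      simp only [pvGo, if_pos ha, htw, List.length_cons]
      rw [ih (base + 1) s0]
      by_cases hlt : (rest.takeWhile PySem.Chars.isalpha).length < rest.length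
      · rw [if_pos hlt, if_pos (by omega)]
        simp only [List.drop_succ_cons]
        congr 2 <;> omega
      · rw [if_neg hlt, if_neg (by omega)]
        congr 2
        omega
    · have htw : (c :: rest).takeWhile PySem.Chars.isalpha = [] := by
        simp [ha]
      simp only [pvGo, if_neg ha, htw, List.length_nil, List.length_cons]
      rw [if_pos (by omega)]
      simp [List.drop_succ_cons]

-- first index failing p is the length of the p-prefix
theorem pvFindIdx_neg (p : Char → Bool) (l : List Char) :
    l.findIdx? (fun c => !(p c))
      = (if (l.takeWhile p).length < l.length then some (l.takeWhile p).length else none) := by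
  induction l with
  | nil => simp
  | cons c rest ih =>
    rw [List.findIdx?_cons]
    by_cases hc : p c
    · have htw : (c :: rest).takeWhile p = c :: rest.takeWhile p := by
        simp [hc]
      simp only [hc, Bool.not_true, Bool.false_eq_true, if_false, ih, htw, List.length_cons]
      by_cases hlt : (rest.takeWhile p).length < rest.length
      · rw [if_pos hlt, if_pos (by omega)]; rfl
      · rw [if_neg hlt, if_neg (by omega)]; rfl
    · have hcf : p c = false := by simpa using hc
      have htw : (c :: rest).takeWhile p = [] := by simp [hcf]
      simp only [hcf, Bool.not_false, if_pos, htw, List.length_nil, List.length_cons]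
      rw [if_pos (by omega)]

-- characters strictly inside the p-prefix satisfy p
theorem pvTakeWhile_mem (p : Char → Bool) (l : List Char) (k : Nat)
    (h : k < (l.takeWhile p).length) :
    p (l[k]'(lt_of_lt_of_le h (List.takeWhile_prefix p).length_le)) = true := by
  have hg := (List.takeWhile_prefix (l := l) p).getElem h
  have hx : p ((l.takeWhile p)[k]) = true := List.mem_takeWhile_imp (List.getElem_mem h)
  rwa [hg] at hx

-- the character right after the p-prefix fails p
theorem pvTakeWhile_stop (p : Char → Bool) (l : List Char) :
    ∀ (h : (l.takeWhile p).length < l.length),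
      p (l[(l.takeWhile p).length]'h) = false := by
  induction l with
  | nil => intro h; simp at h
  | cons c rest ih =>
    by_cases hc : p c
    · have htw : (c :: rest).takeWhile p = c :: rest.takeWhile p := by simp [hc]
      rw [htw]
      intro h
      simpa using ih (by simpa using h)
    · have hcf : p c = false := by simpa using hc
      have htw : (c :: rest).takeWhile p = [] := by simp [hcf]
      rw [htw]
      intro h
      simpa using hcf

-- the p-prefix of a suffix inside the p-prefix
theorem pvTakeWhile_drop (p : Char → Bool) (l : List Char) :
    ∀ (q : Nat), q ≤ (l.takeWhile p).length →
      (l.drop q).takeWhile p = (l.takeWhile p).drop q := by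
  induction l with
  | nil => intro q _; simp
  | cons c rest ih =>
    intro q hq
    cases q with
    | zero => simp
    | succ q' =>
      have hc : p c = true := by
        by_contra hcf
        have : (c :: rest).takeWhile p = [] := by
          simp [show p c = false by simpa using hcf]
        rw [this] at hq; simp at hq
      have htw : (c :: rest).takeWhile p = c :: rest.takeWhile p := by
        simp [hc]
      rw [htw] at hq ⊢
      simp only [List.drop_succ_cons]
      exact ih q' (by simpa using hq)

-- dropping to an element that matches: the search succeeds immediately
theorem pvFindIdx_drop_head_true (pp : Char → Bool) (l : List Char) (k : Nat)
    (hk : k < l.length) (h : pp l[k] = true) :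
    (l.drop k).findIdx? pp = some 0 := by
  rw [List.drop_eq_getElem_cons hk, List.findIdx?_cons, if_pos h]

-- dropping to an element that fails: the search shifts by one
theorem pvFindIdx_drop_head_false (pp : Char → Bool) (l : List Char) (k : Nat)
    (hk : k < l.length) (h : pp l[k] = false) :
    (l.drop k).findIdx? pp = ((l.drop (k + 1)).findIdx? pp).map (· + 1) := by
  rw [List.drop_eq_getElem_cons hk, List.findIdx?_cons, if_neg (by simp [h])]

-- the middle form, relative to a suffix starting at `base`
def pvRn (l : List Char) (base p : Nat) : Int × Int :=
  match (l.drop (max p base - base)).findIdx? PySem.Chars.isalpha with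
  | none => (-1, -1)
  | some j =>
    (((max p base + j : Nat) : Int),
      match (l.drop (max p base - base + j + 1)).findIdx? (fun c => !(PySem.Chars.isalpha c)) with
      | none => (-1 : Int)
      | some j2 => ((max p base + j + 1 + j2 : Nat) : Int))

-- stepping past a non-alphabetic character shifts the middle form by one
theorem pvRn_cons_notalpha (c : Char) (rest : List Char) (base p : Nat)
    (ha : PySem.Chars.isalpha c = false) :
    pvRn (c :: rest) base p = pvRn rest (base + 1) p := by
  unfold pvRn
  by_cases hpb : p ≤ base
  · rw [show max p base - base = 0 by omega, show max p (base + 1) - (base + 1) = 0 by omega,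
      List.drop_zero, List.drop_zero, List.findIdx?_cons, if_neg (by simp [ha])]
    cases hfi : rest.findIdx? PySem.Chars.isalpha with
    | none => simp [hfi]
    | some j =>
      simp only [hfi, Option.map_some]
      rw [show (c :: rest).drop (0 + (j + 1) + 1) = rest.drop (0 + j + 1) from by
        rw [show 0 + (j + 1) + 1 = (0 + j + 1) + 1 by omega, List.drop_succ_cons]]
      cases hfi2 : (rest.drop (0 + j + 1)).findIdx? (fun c => !(PySem.Chars.isalpha c)) with
      | none => simp only [Prod.mk.injEq, true_and, and_true]; try omega
      | some j2 => simp only [Prod.mk.injEq, true_and, and_true]; try omega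
  · rw [show max p base - base = (p - (base + 1)) + 1 by omega, List.drop_succ_cons,
      show max p (base + 1) - (base + 1) = p - (base + 1) by omega]
    cases hfi : (rest.drop (p - (base + 1))).findIdx? PySem.Chars.isalpha with
    | none => simp [hfi]
    | some j =>
      simp only []
      rw [show (c :: rest).drop ((p - (base + 1)) + 1 + j + 1)
          = rest.drop ((p - (base + 1)) + j + 1) from by
        rw [show (p - (base + 1)) + 1 + j + 1 = ((p - (base + 1)) + j + 1) + 1 by omega,
          List.drop_succ_cons]]
      cases hfi2 : (rest.drop ((p - (base + 1)) + j + 1)).findIdx? (fun c => !(PySem.Chars.isalpha c)) with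
      | none => simp only [Prod.mk.injEq, true_and, and_true]; try omega
      | some j2 => simp only [Prod.mk.injEq, true_and, and_true]; try omega

-- a scan position inside a run: the middle form reports (max p base, end of the run)
theorem pvRn_inside (c : Char) (rest : List Char) (base p : Nat)
    (ha : PySem.Chars.isalpha c = true)
    (hp : p < base + 1 + (rest.takeWhile PySem.Chars.isalpha).length) :
    pvRn (c :: rest) base p
      = (((max p base : Nat) : Int),
         if (rest.takeWhile PySem.Chars.isalpha).length < rest.length then
           (((base + 1 + (rest.takeWhile PySem.Chars.isalpha).length : Nat)) : Int)
         else -1) := by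
  unfold pvRn
  by_cases hpb : p ≤ base
  · rw [show max p base - base = 0 by omega, List.drop_zero, List.findIdx?_cons, if_pos ha]
    simp only
    rw [show (c :: rest).drop (0 + 0 + 1) = rest from by simp, pvFindIdx_neg]
    by_cases hA : (rest.takeWhile PySem.Chars.isalpha).length < rest.length
    · rw [if_pos hA, if_pos hA]
      simp only [Prod.mk.injEq, true_and, and_true]; try omega
    · rw [if_neg hA, if_neg hA]
      simp only [Prod.mk.injEq, true_and, and_true]; try omega
  · have hlt : p - base - 1 < (rest.takeWhile PySem.Chars.isalpha).length := by omega
    have hltr : p - base - 1 < rest.length :=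
      lt_of_lt_of_le hlt (List.takeWhile_prefix _).length_le
    rw [show max p base - base = (p - base - 1) + 1 by omega, List.drop_succ_cons,
      pvFindIdx_drop_head_true PySem.Chars.isalpha rest (p - base - 1) hltr
        (pvTakeWhile_mem _ rest _ hlt)]
    simp only
    rw [show (c :: rest).drop ((p - base - 1) + 1 + 0 + 1) = rest.drop ((p - base - 1) + 1) from by
      rw [show (p - base - 1) + 1 + 0 + 1 = ((p - base - 1) + 1) + 1 by omega,
        List.drop_succ_cons]]
    rw [pvFindIdx_neg, pvTakeWhile_drop _ rest ((p - base - 1) + 1) (by omega)]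
    simp only [List.length_drop]
    by_cases hA : (rest.takeWhile PySem.Chars.isalpha).length < rest.length
    · rw [if_pos (by omega), if_pos hA]
      simp only [Prod.mk.injEq, true_and, and_true]; try omega
    · rw [if_neg (by omega), if_neg hA]
      simp only [Prod.mk.injEq, true_and, and_true]; try omega

-- a scan position past a run: the middle form skips the whole run
theorem pvRn_skip (c : Char) (rest : List Char) (base p : Nat)
    (hA : (rest.takeWhile PySem.Chars.isalpha).length < rest.length)
    (hp : base + 1 + (rest.takeWhile PySem.Chars.isalpha).length ≤ p) :
    pvRn (c :: rest) base p
      = pvRn (rest.drop ((rest.takeWhile PySem.Chars.isalpha).length + 1))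
          (base + (rest.takeWhile PySem.Chars.isalpha).length + 2) p := by
  unfold pvRn
  rw [show max p base - base = (p - base - 1) + 1 by omega, List.drop_succ_cons]
  by_cases hcase : p = base + 1 + (rest.takeWhile PySem.Chars.isalpha).length
  · -- the scan position is exactly the first index after the run
    rw [show p - base - 1 = (rest.takeWhile PySem.Chars.isalpha).length by omega,
      pvFindIdx_drop_head_false PySem.Chars.isalpha rest (rest.takeWhile PySem.Chars.isalpha).length hA
        (pvTakeWhile_stop _ rest hA)]
    rw [show max p (base + (rest.takeWhile PySem.Chars.isalpha).length + 2) - (base + (rest.takeWhile PySem.Chars.isalpha).length + 2) = 0 by omega, List.drop_zero]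
    cases hfi : (rest.drop ((rest.takeWhile PySem.Chars.isalpha).length + 1)).findIdx? PySem.Chars.isalpha with
    | none => simp
    | some j =>
      simp only [Option.map_some]
      rw [show (c :: rest).drop ((rest.takeWhile PySem.Chars.isalpha).length + 1 + (j + 1) + 1)
          = (rest.drop ((rest.takeWhile PySem.Chars.isalpha).length + 1)).drop (0 + j + 1) from by
        rw [List.drop_drop,
          show (rest.takeWhile PySem.Chars.isalpha).length + 1 + (j + 1) + 1 = (((rest.takeWhile PySem.Chars.isalpha).length + 1) + (0 + j + 1)) + 1 by omega,
          List.drop_succ_cons]]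
      cases hfi2 : ((rest.drop ((rest.takeWhile PySem.Chars.isalpha).length + 1)).drop (0 + j + 1)).findIdx?
          (fun c => !(PySem.Chars.isalpha c)) with
      | none => simp only [Prod.mk.injEq, true_and, and_true]; try omega
      | some j2 => simp only [Prod.mk.injEq, true_and, and_true]; try omega
  · -- the scan position is beyond the first index after the run
    rw [show rest.drop (p - base - 1)
        = (rest.drop ((rest.takeWhile PySem.Chars.isalpha).length + 1)).drop (p - (base + (rest.takeWhile PySem.Chars.isalpha).length + 2)) from by
      rw [List.drop_drop]
      congr 1
      omega]
    rw [show max p (base + (rest.takeWhile PySem.Chars.isalpha).length + 2) - (base + (rest.takeWhile PySem.Chars.isalpha).length + 2) = p - (base + (rest.takeWhile PySem.Chars.isalpha).length + 2) by omega]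
    cases hfi : ((rest.drop ((rest.takeWhile PySem.Chars.isalpha).length + 1)).drop (p - (base + (rest.takeWhile PySem.Chars.isalpha).length + 2))).findIdx?
        PySem.Chars.isalpha with
    | none => rfl
    | some j =>
      simp only []
      rw [show (c :: rest).drop ((p - base - 1) + 1 + j + 1)
          = (rest.drop ((rest.takeWhile PySem.Chars.isalpha).length + 1)).drop ((p - (base + (rest.takeWhile PySem.Chars.isalpha).length + 2)) + j + 1) from by
        rw [List.drop_drop,
          show (p - base - 1) + 1 + j + 1
            = (((rest.takeWhile PySem.Chars.isalpha).length + 1) + ((p - (base + (rest.takeWhile PySem.Chars.isalpha).length + 2)) + j + 1)) + 1 by omega,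
          List.drop_succ_cons]]
      cases hfi2 : ((rest.drop ((rest.takeWhile PySem.Chars.isalpha).length + 1)).drop ((p - (base + (rest.takeWhile PySem.Chars.isalpha).length + 2)) + j + 1)).findIdx?
          (fun c => !(PySem.Chars.isalpha c)) with
      | none => simp only [Prod.mk.injEq, true_and, and_true]; try omega
      | some j2 => simp only [Prod.mk.injEq, true_and, and_true]; try omega

-- a scan position past the whole suffix
theorem pvRn_past (l : List Char) (base p : Nat) (hp : base + l.length ≤ p) :
    pvRn l base p = (-1, -1) := by
  unfold pvRn
  rw [List.drop_eq_nil_of_le (by omega : l.length ≤ max p base - base)]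
  rfl

-- selection over the runs of a suffix equals the middle form on that suffix
theorem pvSelect_go (m : Nat) :
    ∀ (l : List Char) (base p : Nat), l.length ≤ m →
      pvSelect (pvGo l base none) ((p : Nat) : Int) (((base + l.length : Nat) : Int))
        = pvRn l base p := by
  induction m with
  | zero =>
    intro l base p hl
    have : l = [] := List.eq_nil_of_length_eq_zero (by omega)
    subst this
    simp [pvGo, pvSelect, pvRn]
  | succ m ih =>
    intro l base p hl
    cases l with
    | nil => simp [pvGo, pvSelect, pvRn]
    | cons c rest =>
      have hl' : rest.length ≤ m := by simp only [List.length_cons] at hl; omega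
      by_cases ha : PySem.Chars.isalpha c
      · rw [show pvGo (c :: rest) base none = pvGo rest (base + 1) (some base) from by
          simp [pvGo, ha]]
        rw [pvGo_some rest (base + 1) base]
        by_cases hA : (rest.takeWhile PySem.Chars.isalpha).length < rest.length
        · rw [if_pos hA]
          by_cases hp : p < base + 1 + (rest.takeWhile PySem.Chars.isalpha).length
          · rw [show pvSelect
                ((((base : Nat) : Int), (((base + 1 + (rest.takeWhile PySem.Chars.isalpha).length : Nat)) : Int))
                  :: pvGo (rest.drop ((rest.takeWhile PySem.Chars.isalpha).length + 1)) (base + 1 + (rest.takeWhile PySem.Chars.isalpha).length + 1) none)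
                ((p : Nat) : Int) (((base + (c :: rest).length : Nat) : Int))
              = (max ((base : Nat) : Int) ((p : Nat) : Int),
                 (((base + 1 + (rest.takeWhile PySem.Chars.isalpha).length : Nat)) : Int)) from by
              simp only [pvSelect]
              rw [if_pos (by push_cast; omega)]
              rw [show ((((base + 1 + (rest.takeWhile PySem.Chars.isalpha).length : Nat)) : Int)
                  == (((base + (c :: rest).length : Nat) : Int))) = false from by
                simp only [beq_eq_false_iff_ne, ne_eq, Nat.cast_inj, List.length_cons]
                omega]
              rw [if_neg (by simp)]]
            rw [pvRn_inside c rest base p ha hp, if_pos hA]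
            simp only [Prod.mk.injEq, true_and, and_true]
            try omega
          · rw [show pvSelect
                ((((base : Nat) : Int), (((base + 1 + (rest.takeWhile PySem.Chars.isalpha).length : Nat)) : Int))
                  :: pvGo (rest.drop ((rest.takeWhile PySem.Chars.isalpha).length + 1)) (base + 1 + (rest.takeWhile PySem.Chars.isalpha).length + 1) none)
                ((p : Nat) : Int) (((base + (c :: rest).length : Nat) : Int))
              = pvSelect
                  (pvGo (rest.drop ((rest.takeWhile PySem.Chars.isalpha).length + 1)) (base + 1 + (rest.takeWhile PySem.Chars.isalpha).length + 1) none)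
                  ((p : Nat) : Int) (((base + (c :: rest).length : Nat) : Int)) from by
              simp only [pvSelect]
              rw [if_neg (by push_cast; omega)]]
            rw [show ((base + (c :: rest).length : Nat))
                = ((base + 1 + (rest.takeWhile PySem.Chars.isalpha).length + 1) + (rest.drop ((rest.takeWhile PySem.Chars.isalpha).length + 1)).length) from by
              simp only [List.length_cons, List.length_drop]
              omega]
            rw [ih _ _ p (by simp only [List.length_drop]; omega)]
            rw [pvRn_skip c rest base p hA (by omega)]
            congr 1
            omega
        · rw [if_neg hA]
          have hA1 : (rest.takeWhile PySem.Chars.isalpha).length = rest.length := by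
            have := (List.takeWhile_prefix (l := rest) PySem.Chars.isalpha).length_le
            omega
          by_cases hp : p < base + 1 + rest.length
          · rw [show pvSelect
                [(((base : Nat) : Int), (((base + 1 + rest.length : Nat)) : Int))]
                ((p : Nat) : Int) (((base + (c :: rest).length : Nat) : Int))
              = ((max ((base : Nat) : Int) ((p : Nat) : Int)), (-1 : Int)) from by
              simp only [pvSelect]
              rw [if_pos (by push_cast; omega)]
              rw [show ((((base + 1 + rest.length : Nat)) : Int)
                  == (((base + (c :: rest).length : Nat) : Int))) = true from by
                simp only [beq_iff_eq, Nat.cast_inj, List.length_cons]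
                omega]
              rfl]
            rw [pvRn_inside c rest base p ha (by omega), hA1, if_neg (by omega)]
            simp only [Prod.mk.injEq, true_and, and_true]
            try omega
          · rw [show pvSelect
                [(((base : Nat) : Int), (((base + 1 + rest.length : Nat)) : Int))]
                ((p : Nat) : Int) (((base + (c :: rest).length : Nat) : Int))
              = ((-1 : Int), (-1 : Int)) from by
              simp only [pvSelect]
              rw [if_neg (by push_cast; omega)]]
            rw [pvRn_past (c :: rest) base p (by simp only [List.length_cons]; omega)]
      · rw [show pvGo (c :: rest) base none = pvGo rest (base + 1) none from by
          simp [pvGo, ha]]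
        rw [show ((base + (c :: rest).length : Nat)) = ((base + 1) + rest.length) from by
          simp only [List.length_cons]; omega]
        rw [ih rest (base + 1) p hl']
        exact (pvRn_cons_notalpha c rest base p (by simpa using ha)).symm

-- the middle form on the whole text, started at k
theorem pvRn_zero (chars : List Char) (k : Nat) :
    pvRn chars 0 k = pvTwo chars k := by
  unfold pvRn
  rw [show max k 0 - 0 = k by omega, show max k 0 = k by omega]
  show (match (chars.drop k).findIdx? PySem.Chars.isalpha with
      | none => ((-1 : Int), (-1 : Int))
      | some j => (((k + j : Nat) : Int),
          match (chars.drop (k + j + 1)).findIdx? (fun c => !(PySem.Chars.isalpha c)) with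
          | none => (-1 : Int)
          | some j2 => ((k + j + 1 + j2 : Nat) : Int)))
    = (if pvFindFrom chars PySem.Chars.isalpha k == -1 then ((-1 : Int), (-1 : Int))
       else (pvFindFrom chars PySem.Chars.isalpha k,
         pvFindFrom chars (fun c => !(PySem.Chars.isalpha c))
           ((pvFindFrom chars PySem.Chars.isalpha k).toNat + 1)))
  unfold pvFindFrom
  cases hfi : (chars.drop k).findIdx? PySem.Chars.isalpha with
  | none => simp
  | some j =>
    have hne : (((k + j : Nat) : Int) == -1) = false := by
      simp only [beq_eq_false_iff_ne, ne_eq]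
      omega
    simp only [hne, Bool.false_eq_true, if_false, Int.toNat_natCast]

-- the two stages together equal the middle form
theorem pvAltKey (chars : List Char) (k : Nat) :
    pvSelect
      (match ((PySem.List.enumerate chars (0 : Int)).foldl pvRunsStep ([], none)).2 with
       | some s0 => ((PySem.List.enumerate chars (0 : Int)).foldl pvRunsStep ([], none)).1
           ++ [(s0, (chars.length : Int))]
       | none => ((PySem.List.enumerate chars (0 : Int)).foldl pvRunsStep ([], none)).1)
      ((k : Nat) : Int) (chars.length : Int)
      = pvTwo chars k := by
  have hf := pvFold_eq_go chars 0 [] none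
  simp only [pvCastOpt, Nat.cast_zero, Nat.zero_add] at hf
  rw [hf, List.nil_append]
  have hs := pvSelect_go chars.length chars 0 k (by omega)
  simp only [Nat.zero_add] at hs
  rw [hs, pvRn_zero]

-- ===== VERDICT (by name: the statement is the Claim_ definition above) =====
theorem find_word_range_from_spec : Claim_equal_find_word_range_from := by
  intro text from_idx _ hpre
  unfold Pre_find_word_range_from at hpre
  unfold Spec_find_word_range_from find_word_range_from find_word_range_from_alt
  set chars := text.toList with hchars
  by_cases hneg : 0 ≤ from_idx
  · rw [show from_idx = ((from_idx.toNat : Nat) : Int) by omega,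
      show max ((from_idx.toNat : Nat) : Int) 0 = ((from_idx.toNat : Nat) : Int) by omega,
      pvKey chars from_idx.toNat]
    exact (pvAltKey chars from_idx.toNat).symm
  · have hlen : 0 < chars.length := by omega
    rw [show max from_idx 0 = (((0 : Nat)) : Int) by omega,
      show from_idx = -(((-from_idx).toNat : Nat) : Int) by omega,
      pvGoA_neg_prefix chars (-from_idx).toNat (-1) (by omega) (by omega) (by omega),
      show (0 : Int) = ((0 : Nat) : Int) from rfl,
      pvKey chars 0]
    exact (pvAltKey chars 0).symm
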